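-- pv_equiv track=rewrite | github.com/sonnt3377/projecteuler | project_euler_48.py | do_work
-- ===== SOURCE A (Python) =====
-- def do_work(n):
--     """
--     Find the last ten digit of the sum 1^1 + 2^2 + ... n^n
--
--     :param n: input number
--     :return: the last ten digit of the sum
--     """
--     """
--     Analysis: we use two properties of modulo arithmetic
--         (a + b) mod n = [(a mod n) + (b mod n)] mod n
--         (a * b) mod n = (a mod n) * (b mod n)
--     """
--     # For number n, the remainder of n mod 10000000000 is the last 10 digits of that number
--     divisor = 10000000000
--     result = 0
--
--     for i in range(1, n + 1):
--         temp = i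
--         # Finding i^i mod n
--         for j in range(1, i):
--             temp *= i
--             temp %= divisor
--
--         # Finding (i^i + j^j) mod n
--         result += temp
--         result %= divisor
--
--     return result
-- ===== SOURCE B (Python) =====
-- def do_work(n):
--     """Last ten digits of 1^1 + 2^2 + ... + n^n, computed with
--     square-and-multiply modular exponentiation per term."""
--     divisor = 10000000000
--     result = 0
--     for i in range(1, n + 1):
--         base = i % divisor
--         e = i
--         t = 1
--         while e > 0:
--             if e % 2 == 1:
--                 t = t * base % divisor
--             base = base * base % divisor
--             e //= 2
--         result = (result + t) % divisor
--     return result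
-- ===== Notes on version B (the rewrite author's own statement) =====
-- stated objective: faster
-- what changed: The inner linear multiplication loop computing each power modulo the divisor is replaced by hand-written square-and-multiply modular exponentiation, logarithmic per term; the outer accumulation is unchanged.
import Mathlib
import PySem

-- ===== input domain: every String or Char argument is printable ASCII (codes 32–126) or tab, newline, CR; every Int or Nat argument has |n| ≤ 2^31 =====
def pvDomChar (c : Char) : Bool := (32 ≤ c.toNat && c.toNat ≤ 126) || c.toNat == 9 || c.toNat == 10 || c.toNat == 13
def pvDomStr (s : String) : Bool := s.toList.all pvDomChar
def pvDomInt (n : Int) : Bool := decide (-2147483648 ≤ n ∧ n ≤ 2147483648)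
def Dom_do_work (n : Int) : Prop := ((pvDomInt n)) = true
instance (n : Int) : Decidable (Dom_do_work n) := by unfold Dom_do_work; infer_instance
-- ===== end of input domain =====

-- B replaces A's O(i)-step inner multiplication loop by square-and-multiply
-- modular exponentiation (O(log i) per term); objective: faster.

-- ===== PORT A =====
def do_work (n : Int) : Int :=
  let divisor : Int := 10000000000
  (PySem.List.pyRange 1 (n + 1) 1).foldl
    (fun result i =>
      let temp :=
        (PySem.List.pyRange 1 i 1).foldl
          (fun temp _ => PySem.Int.mod (temp * i) divisor) i
      PySem.Int.mod (result + temp) divisor)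
    0

-- ===== PORT B =====
-- the 'while e > 0' square-and-multiply loop of Source B; terminates since e //= 2 shrinks e.toNat
def pvModpow (base t e divisor : Int) : Int :=
  if h : 0 < e then
    let t' := if PySem.Int.mod e 2 = 1 then PySem.Int.mod (t * base) divisor else t
    pvModpow (PySem.Int.mod (base * base) divisor) t' (PySem.Int.floordiv e 2) divisor
  else t
termination_by e.toNat
decreasing_by
  rw [PySem.Int.floordiv_eq_ediv_of_pos (by omega : (0:Int) < 2)]
  omega

def do_work_alt (n : Int) : Int :=
  let divisor : Int := 10000000000
  (PySem.List.pyRange 1 (n + 1) 1).foldl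
    (fun result i =>
      PySem.Int.mod (result + pvModpow (PySem.Int.mod i divisor) 1 i divisor) divisor)
    0

-- ===== PRECONDITION & SPEC =====
def Spec_do_work (n : Int) (out : Int) : Prop := out = do_work_alt n
instance (n : Int) (out : Int) : Decidable (Spec_do_work n out) := by unfold Spec_do_work; infer_instance

-- ===== CLAIM (what is proved, stated in full; the proofs are below) =====
def Claim_equal_do_work : Prop := ∀ (n : Int), Dom_do_work n → Spec_do_work n (do_work n)

-- ===== LEMMAS AND PROOFS =====

-- A's inner loop over any nonempty list multiplies the accumulator by i once per element, mod d.
lemma foldA_eq_pow (i : Int) (d : Int) (hd : 0 < d) :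
    ∀ (l : List Int) (t : Int), l ≠ [] →
      l.foldl (fun temp _ => PySem.Int.mod (temp * i) d) t = (t * i ^ l.length) % d := by
  intro l
  induction l with
  | nil => intro t h; exact absurd rfl h
  | cons a l ih =>
    intro t _
    simp only [List.foldl_cons]
    rcases Decidable.em (l = []) with hnil | hne
    · subst hnil
      simp [PySem.Int.mod_eq_emod_of_pos hd, pow_one]
    · rw [ih _ hne]
      rw [PySem.Int.mod_eq_emod_of_pos hd]
      rw [Int.mul_emod, Int.emod_emod_of_dvd _ (dvd_refl d), ← Int.mul_emod,
        List.length_cons, pow_succ]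
      ring_nf

-- (z^m) mod d reduces z mod d first (general fact; no narrower named lemma closed it)
lemma myPowEmod (z : Int) (m : Nat) (d : Int) : z ^ m % d = (z % d) ^ m % d := by
  induction m with
  | zero => simp
  | succ k ih =>
    rw [pow_succ, pow_succ, Int.mul_emod, ih, ← Int.mul_emod]
    conv_rhs => rw [Int.mul_emod, Int.emod_emod_of_dvd _ (dvd_refl d), ← Int.mul_emod]

-- pvModpow computes modular exponentiation: for 0 < e, pvModpow b t e d = (t * b ^ e.toNat) % d.
lemma pvModpow_eq (d : Int) (hd : 0 < d) :
    ∀ (k : Nat) (e : Int), e.toNat = k → 0 < e → ∀ (b t : Int),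
      pvModpow b t e d = (t * b ^ e.toNat) % d := by
  intro k
  induction k using Nat.strong_induction_on with
  | _ k ih =>
    intro e hk he b t
    rw [pvModpow, dif_pos he]
    rw [PySem.Int.floordiv_eq_ediv_of_pos (by omega : (0:Int) < 2),
        PySem.Int.mod_eq_emod_of_pos (by omega : (0:Int) < 2)]
    set e2 := e / 2 with he2
    have hpar : e % 2 = 0 ∨ e % 2 = 1 := by omega
    by_cases h2 : 0 < e2
    · rw [ih e2.toNat (by omega) e2 rfl h2]
      simp only [PySem.Int.mod_eq_emod_of_pos hd]
      have hbb : ∀ m : Nat, (b * b) ^ m = b ^ (2 * m) := by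
        intro m; rw [pow_mul]; ring_nf
      rcases hpar with hpar | hpar
      · rw [if_neg (by omega)]
        rw [Int.mul_emod, ← myPowEmod, ← Int.mul_emod, hbb]
        congr 1
        rw [show e.toNat = 2 * e2.toNat by omega]
      · rw [if_pos hpar]
        rw [Int.mul_emod, ← myPowEmod, Int.emod_emod_of_dvd _ (dvd_refl d), ← Int.mul_emod, hbb]
        congr 1
        rw [show e.toNat = 2 * e2.toNat + 1 by omega, pow_succ]
        ring
    · -- e2 = 0, so e = 1
      have he1 : e = 1 := by omega
      subst he1
      rw [if_pos (by decide)]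
      rw [pvModpow, dif_neg (by norm_num)]
      simp [PySem.Int.mod_eq_emod_of_pos hd]

-- per-term equality: for 1 ≤ i both programs' term is i ^ i.toNat % d
lemma term_eq (d : Int) (hd : 1 < d) (i : Int) (hi : 1 ≤ i) :
    (PySem.List.pyRange 1 i 1).foldl (fun temp _ => PySem.Int.mod (temp * i) d) i
      = pvModpow (PySem.Int.mod i d) 1 i d := by
  have hd0 : (0:Int) < d := by omega
  rw [pvModpow_eq d hd0 i.toNat i rfl (by omega)]
  rw [PySem.Int.mod_eq_emod_of_pos hd0, one_mul, ← myPowEmod]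
  by_cases h1 : i = 1
  · subst h1
    rw [PySem.List.pyRange_one_eq_nil (by omega)]
    simp [Int.emod_eq_of_lt (by omega : (0:Int) ≤ 1) (by omega : (1:Int) < d)]
  · have hne : PySem.List.pyRange 1 i 1 ≠ [] := by
      rw [PySem.List.pyRange_one_cons (by omega : (1:Int) < i)]
      simp
    rw [foldA_eq_pow i d hd0 _ i hne, PySem.List.length_pyRange_one]
    congr 1
    rw [show i.toNat = (i - 1).toNat + 1 by omega, pow_succ]
    ring

theorem do_work_spec : Claim_equal_do_work := by
  intro n _
  unfold Spec_do_work do_work do_work_alt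
  simp only []
  apply PySem.List.foldl_congr_mem
  intro acc i hi
  have h1 : 1 ≤ i := (PySem.List.mem_pyRange_one.mp hi).1
  rw [term_eq 10000000000 (by norm_num) i h1]
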